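-- pv_equiv track=rewrite | github.com/avouacr/aoc-2019 | day4/day4.py | double_only
-- ===== SOURCE A (Python) =====
-- def has_double(x):
--     x = str(x)
--     for i in range(len(x)-1):
--         if x[i] == x[i+1]:
--             return True
--     return False
--
-- def double_only(x):
--     x = str(x)
--     if has_double(x):
--         x_list = list(x)
--         for d in x_list:
--             if x_list.count(d) == 2:
--                 return True
--     return False
-- ===== SOURCE B (Python) =====
-- def double_only(x):
--     s = str(x)
--     if not any(a == b for a, b in zip(s, s[1:])):
--         return False
--     t = sorted(s)
--     i, n = 0, len(t)
--     while i < n: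
--         j = i
--         while j < n and t[j] == t[i]:
--             j += 1
--         if j - i == 2:
--             return True
--         i = j
--     return False
-- ===== Notes on version B (the rewrite author's own statement) =====
-- stated objective: alternative
-- what changed: Replaces the per-digit repeated list.count scan (quadratic in the digit string) with a zip-based adjacency test plus a sort-then-run-length single pass that returns True iff some maximal run of equal digits has length exactly 2.
import Mathlib
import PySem

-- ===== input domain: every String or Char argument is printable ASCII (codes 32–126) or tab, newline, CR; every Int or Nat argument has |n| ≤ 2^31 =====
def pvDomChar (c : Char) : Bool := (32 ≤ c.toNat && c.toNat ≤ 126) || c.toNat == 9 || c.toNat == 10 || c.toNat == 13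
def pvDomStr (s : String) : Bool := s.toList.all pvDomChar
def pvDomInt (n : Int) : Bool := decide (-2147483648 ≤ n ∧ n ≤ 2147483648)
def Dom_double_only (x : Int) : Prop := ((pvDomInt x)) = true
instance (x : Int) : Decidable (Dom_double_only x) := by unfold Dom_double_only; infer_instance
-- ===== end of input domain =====

-- B replaces A's per-digit repeated .count scan by an adjacency zip test plus a
-- sort-then-run-length pass (a run of length exactly 2 = a digit with count 2).

-- ===== PORT A =====
-- for i in range(len(x)-1): if x[i] == x[i+1]: return True  (indices always in range)
def hasDouble (s : List Char) : Bool :=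
  (List.range (s.length - 1)).any (fun i => s.getD i ' ' == s.getD (i + 1) ' ')

def double_only (x : Int) : Bool :=
  let s := (PySem.Int.toStr x).toList
  if hasDouble s then
    s.any (fun d => PySem.List.count s d == 2)
  else false

-- ===== PORT B =====
-- any(a == b for a, b in zip(s, s[1:]))
def adjZip (s : List Char) : Bool :=
  (s.zip (s.drop 1)).any (fun p => p.1 == p.2)

-- the while loop over the sorted list: advance j over the maximal run starting at i,
-- succeed iff some run has length exactly 2
def runTwice : List Char → Bool
  | [] => false
  | a :: t =>
    if (t.takeWhile (fun c => c == a)).length + 1 == 2 then true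
    else runTwice (t.dropWhile (fun c => c == a))
termination_by l => l.length
decreasing_by
  simpa using Nat.lt_succ_of_le (t.length_dropWhile_le _)

def double_only_alt (x : Int) : Bool :=
  let s := (PySem.Int.toStr x).toList
  if !adjZip s then false
  else runTwice (PySem.List.sorted s (fun c => c) false)

-- ===== PRECONDITION & SPEC =====
def Spec_double_only (x : Int) (out : Bool) : Prop := out = double_only_alt x
instance (x : Int) (out : Bool) : Decidable (Spec_double_only x out) := by unfold Spec_double_only; infer_instance

-- ===== CLAIM (what is proved, stated in full; the proofs are below) =====
def Claim_equal_double_only : Prop := ∀ (x : Int), Dom_double_only x → Spec_double_only x (double_only x)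

-- ===== LEMMAS AND PROOFS =====

-- A's indexed adjacent scan equals B's zip scan
theorem hasDouble_eq_adjZip (s : List Char) : hasDouble s = adjZip s := by
  induction s with
  | nil => rfl
  | cons a t ih =>
    cases t with
    | nil => rfl
    | cons b t' =>
      have h1 : hasDouble (a :: b :: t') = ((a == b) || hasDouble (b :: t')) := by
        simp [hasDouble, List.range_succ_eq_map, List.any_map, Function.comp_def]
      have h2 : adjZip (a :: b :: t') = ((a == b) || adjZip (b :: t')) := by
        simp [adjZip]
      rw [h1, h2, ih]

theorem dropWhile_head_false {p : Char → Bool} :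
    ∀ (t : List Char) (hd : Char) (tl : List Char), t.dropWhile p = hd :: tl → p hd = false := by
  intro t
  induction t with
  | nil => intro hd tl h; simp at h
  | cons c t ih =>
    intro hd tl h
    rw [List.dropWhile_cons] at h
    split at h
    · exact ih hd tl h
    · rename_i hpc; cases h; simpa using hpc

-- run-analysis facts for a sorted list a :: t
theorem sorted_run_facts (a : Char) (t : List Char)
    (h : (a :: t).Pairwise (· ≤ ·)) :
    (∀ c ∈ t.takeWhile (fun c => c == a), a = c) ∧
    a ∉ t.dropWhile (fun c => c == a) ∧
    (t.dropWhile (fun c => c == a)).Pairwise (· ≤ ·) := by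
  have ht : t.Pairwise (· ≤ ·) := (List.pairwise_cons.mp h).2
  have ha : ∀ c ∈ t, a ≤ c := (List.pairwise_cons.mp h).1
  have hk : ∀ c ∈ t.takeWhile (fun c => c == a), a = c := by
    intro c hc
    exact (eq_of_beq (List.mem_takeWhile_imp (p := fun c => c == a) hc)).symm
  have hr : (t.dropWhile (fun c => c == a)).Pairwise (· ≤ ·) :=
    ht.sublist (List.dropWhile_sublist _)
  refine ⟨hk, ?_, hr⟩
  intro hmem
  cases hr0 : t.dropWhile (fun c => c == a) with
  | nil => rw [hr0] at hmem; exact absurd hmem (List.not_mem_nil)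
  | cons hd tl =>
    have hhd : (hd == a) = false := dropWhile_head_false t hd tl hr0
    have hne : hd ≠ a := by intro e; rw [e] at hhd; simp at hhd
    have hdt : hd ∈ t := (List.dropWhile_sublist _).mem (hr0 ▸ List.mem_cons_self)
    have hlt : a < hd := lt_of_le_of_ne (ha hd hdt) (Ne.symm hne)
    rw [hr0] at hmem
    rcases List.mem_cons.mp hmem with rfl | hmem'
    · exact hne rfl
    · have hle : hd ≤ a := (List.pairwise_cons.mp (hr0 ▸ hr)).1 a hmem'
      exact absurd (lt_of_lt_of_le hlt hle) (lt_irrefl a)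

-- count of the head of a sorted list = length of its initial run
theorem sorted_count_head (a : Char) (t : List Char)
    (h : (a :: t).Pairwise (· ≤ ·)) :
    List.count a (a :: t) = (t.takeWhile (fun c => c == a)).length + 1 := by
  obtain ⟨hk, har, -⟩ := sorted_run_facts a t h
  have hck : List.count a (t.takeWhile (fun c => c == a))
      = (t.takeWhile (fun c => c == a)).length := by
    apply List.count_eq_length.mpr
    intro b hb
    exact hk b hb
  have hcr : List.count a (t.dropWhile (fun c => c == a)) = 0 :=
    List.count_eq_zero.mpr har
  have hct : List.count a t = (t.takeWhile (fun c => c == a)).length := by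
    conv_lhs => rw [← List.takeWhile_append_dropWhile (p := fun c => c == a) (l := t)]
    rw [List.count_append, hck, hcr]
    omega
  rw [List.count_cons_self, hct]

-- on a sorted list, some maximal run has length exactly 2 ↔ some element has count 2
theorem runTwice_eq_any_count :
    ∀ (l : List Char), l.Pairwise (· ≤ ·) →
      runTwice l = l.any (fun d => PySem.List.count l d == 2) := by
  intro l
  induction l using runTwice.induct with
  | case1 => intro _; simp [runTwice]
  | case2 a t hcond =>
    intro h
    have hklen : (t.takeWhile (fun c => c == a)).length + 1 = 2 := by simpa using hcond
    have hcount : List.count a (a :: t) = 2 := by rw [sorted_count_head a t h, hklen]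
    have hrt : runTwice (a :: t) = true := by rw [runTwice]; simp [hcond]
    rw [hrt]
    symm
    rw [List.any_eq_true]
    exact ⟨a, List.mem_cons_self, by simp [PySem.List.count_eq, hcount]⟩
  | case3 a t hcond ih =>
    intro h
    obtain ⟨hk, har, hr⟩ := sorted_run_facts a t h
    have hcnot : ¬ (List.count a (a :: t) = 2) := by
      rw [sorted_count_head a t h]
      simpa using hcond
    -- counts of elements outside the initial run are unchanged by dropping it
    have hcd : ∀ d, d ≠ a →
        List.count d (a :: t) = List.count d (t.dropWhile (fun c => c == a)) := by
      intro d hd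
      have hckd : List.count d (t.takeWhile (fun c => c == a)) = 0 :=
        List.count_eq_zero.mpr (fun hm => hd ((hk d hm).symm))
      have h0 : List.count d (a :: t) = List.count d t := by
        simp [(Ne.symm hd : a ≠ d)]
      rw [h0]
      conv_lhs => rw [← List.takeWhile_append_dropWhile (p := fun c => c == a) (l := t)]
      rw [List.count_append, hckd, Nat.zero_add]
    have hrw : runTwice (a :: t) = runTwice (t.dropWhile (fun c => c == a)) := by
      rw [runTwice]; simp [hcond]
    rw [hrw, ih hr]
    simp only [PySem.List.count_eq]
    rw [Bool.eq_iff_iff]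
    simp only [List.any_eq_true]
    constructor
    · rintro ⟨d, hdm, hQd⟩
      have hda : d ≠ a := fun e => har (e ▸ hdm)
      have hdt : d ∈ t := (List.dropWhile_sublist _).mem hdm
      refine ⟨d, List.mem_cons_of_mem a hdt, ?_⟩
      rw [hcd d hda]
      exact hQd
    · rintro ⟨d, hdm, hPd⟩
      by_cases hda : d = a
      · subst hda
        exact absurd (by simpa using hPd) hcnot
      · have hc2 : List.count d (t.dropWhile (fun c => c == a)) = 2 := by
          rw [← hcd d hda]
          simpa using hPd
        exact ⟨d, List.count_pos_iff.mp (by omega), by simp [hc2]⟩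

theorem double_only_spec : Claim_equal_double_only := by
  intro x _
  unfold Spec_double_only double_only double_only_alt
  dsimp only
  rw [hasDouble_eq_adjZip]
  cases hadj : adjZip (PySem.Int.toStr x).toList with
  | false => simp
  | true =>
    simp only [Bool.not_true, Bool.false_eq_true, if_false, if_true]
    have hperm : (PySem.List.sorted (PySem.Int.toStr x).toList (fun c => c) false).Perm
        (PySem.Int.toStr x).toList := PySem.List.sorted_perm _ _ _
    have hpw : (PySem.List.sorted (PySem.Int.toStr x).toList (fun c => c) false).Pairwise
        (· ≤ ·) := PySem.List.sorted_pairwise _ _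
    rw [runTwice_eq_any_count _ hpw]
    simp only [PySem.List.count_eq]
    have hfun : (fun d => List.count d (PySem.List.sorted (PySem.Int.toStr x).toList (fun c => c) false) == 2)
        = (fun d => List.count d (PySem.Int.toStr x).toList == 2) :=
      funext fun d => by rw [hperm.count_eq]
    rw [hfun, hperm.any_eq]
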